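-- pv_equiv track=rewrite | github.com/MatiasRodriguez01/repositorio1 | parcial2/mutante.py | d2
-- ===== SOURCE A (Python) =====
-- def d2(array, element, rows, columns, condition):
--     x = 0 # inicializamos la variable x en 0.
--     # Aca inicamos 2 bucles for:
--     # * uno se inicializara en la desde el valor de la linea recibida hasta 6.
--     # * y el otro se inicializara de 0 hasta la columna recibida
--     for i in range(rows, 6):
--         for j in range(0, columns+1):
--             # en el if, decimos que la suma de i y j (la fila y columna) sea igual que
--             # condition que es el valor que usaremos para recorrer una diagonal inversa
--             if i+j == condition:
--                 # Si la condicion cumple entrara en esta condicion: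
--                 # que dira si ese elemento de la matriz es igual a la letra recibida,
--                 # y asi vamos viendo todos los elementos de la diagonal inversa.
--                 # Si cumple entonces se sumara "X", sino no va a ejecutar nada.
--                 if (array[i][j] == element):
--                     x += 1
--     # Al final devolvera a variable x, que se almacenara en la variable "counter" de la funcion diagonally_2.
--     return x
-- ===== SOURCE B (Python) =====
-- def d2(array, element, rows, columns, condition):
--     return sum(1 for i in range(rows, 6)
--                if 0 <= condition - i <= columns
--                and array[i][condition - i] == element)
-- ===== Notes on version B (the rewrite author's own statement) =====
-- stated objective: simpler
-- what changed: Replaces the nested accumulator loops by a single comprehension that, for each row i, computes the unique anti-diagonal column condition-i directly with a bounds check and counts the matches, removing the inner scan over all columns.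
import Mathlib
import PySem

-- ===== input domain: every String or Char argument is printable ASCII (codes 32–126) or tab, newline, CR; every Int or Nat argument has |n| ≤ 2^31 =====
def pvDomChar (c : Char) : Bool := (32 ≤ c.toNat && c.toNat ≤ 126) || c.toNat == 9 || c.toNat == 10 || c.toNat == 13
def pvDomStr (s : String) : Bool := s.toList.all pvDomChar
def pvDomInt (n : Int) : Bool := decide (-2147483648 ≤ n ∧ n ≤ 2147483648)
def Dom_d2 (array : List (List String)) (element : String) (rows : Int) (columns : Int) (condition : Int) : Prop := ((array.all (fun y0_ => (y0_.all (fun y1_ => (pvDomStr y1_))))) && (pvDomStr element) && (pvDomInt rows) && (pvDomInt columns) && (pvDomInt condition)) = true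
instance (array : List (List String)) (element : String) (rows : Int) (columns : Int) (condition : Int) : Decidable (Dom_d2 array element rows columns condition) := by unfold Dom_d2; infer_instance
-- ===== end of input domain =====

-- B replaces A's nested accumulator loops by a single comprehension counting, per row i,
-- whether the directly computed anti-diagonal column condition - i is in bounds and matches
-- (a single counting pass instead of nested accumulator loops).


-- ===== PORT A =====
def d2 (array : List (List String)) (element : String) (rows : Int) (columns : Int) (condition : Int) : Int :=
  (PySem.List.pyRange rows 6 1).foldl (fun x i =>
    (PySem.List.pyRange 0 (columns + 1) 1).foldl (fun x j =>
      if i + j = condition then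
        (if PySem.List.pyGetD (PySem.List.pyGetD array i []) j "" = element then x + 1 else x)
      else x) x) 0

-- ===== PORT B =====
-- Source B: sum(1 for i in range(rows, 6) if 0 <= condition-i <= columns and array[i][condition-i] == element)
-- ported as counting the rows of the range that pass the filter.
def d2_alt (array : List (List String)) (element : String) (rows : Int) (columns : Int) (condition : Int) : Int :=
  (((PySem.List.pyRange rows 6 1).countP (fun i =>
      decide (0 ≤ condition - i) && decide (condition - i ≤ columns) &&
      (PySem.List.pyGetD (PySem.List.pyGetD array i []) (condition - i) "" == element)) : Nat) : Int)

-- ===== PRECONDITION & SPEC =====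
-- Pre_ excludes exactly the inputs on which A raises IndexError: some visited row i with
-- an in-bounds diagonal column condition - i addresses a cell outside the matrix.
-- The visited diagonal cells are exactly the i in [max rows (condition-columns), min 6 (condition+1)).
def Pre_d2 (array : List (List String)) (element : String) (rows : Int) (columns : Int) (condition : Int) : Prop :=
  min 6 (condition + 1) ≤ max rows (condition - columns) ∨
  (-(array.length : Int) ≤ max rows (condition - columns) ∧
   min 6 (condition + 1) ≤ (array.length : Int) ∧
   ∀ i ∈ PySem.List.pyRange (max rows (condition - columns)) (min 6 (condition + 1)) 1,
     PySem.Raise.InRange (PySem.List.pyGetD array i []).length (condition - i))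
instance (array : List (List String)) (element : String) (rows : Int) (columns : Int) (condition : Int) : Decidable (Pre_d2 array element rows columns condition) := by unfold Pre_d2; infer_instance

def pvWitness_d2 : List (List String) × String × Int × Int × Int := ([["a","b"],["b","a"]], "a", 0, 1, 1)

def Spec_d2 (array : List (List String)) (element : String) (rows : Int) (columns : Int) (condition : Int) (out : Int) : Prop := out = d2_alt array element rows columns condition
instance (array : List (List String)) (element : String) (rows : Int) (columns : Int) (condition : Int) (out : Int) : Decidable (Spec_d2 array element rows columns condition out) := by unfold Spec_d2; infer_instance

-- ===== CLAIM (what is proved, stated in full; the proofs are below) =====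
def Claim_equal_d2 : Prop := ∀ (array : List (List String)) (element : String) (rows : Int) (columns : Int) (condition : Int), Dom_d2 array element rows columns condition → Pre_d2 array element rows columns condition → Spec_d2 array element rows columns condition (d2 array element rows columns condition)

-- ===== LEMMAS AND PROOFS =====

-- A fold whose body fires only at j = c fires at most once: exactly when c lies in the range.
lemma foldl_hit (c b : Int) (g : Int → Int → Int) (a x : Int) :
    (PySem.List.pyRange a b 1).foldl (fun acc j => if j = c then g j acc else acc) x
      = if a ≤ c ∧ c < b then g c x else x := by
  induction hn : (b - a).toNat generalizing a x with
  | zero =>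
    rw [PySem.List.pyRange_one_eq_nil (by omega)]
    simp only [List.foldl_nil]
    rw [if_neg (by omega)]
  | succ m ih =>
    rw [PySem.List.pyRange_one_cons (by omega)]
    simp only [List.foldl_cons]
    rw [ih (a + 1) _ (by omega)]
    by_cases h : a = c
    · subst h
      rw [if_pos rfl, if_neg (by omega), if_pos (by omega)]
    · rw [if_neg h]
      by_cases h2 : a + 1 ≤ c ∧ c < b
      · rw [if_pos h2, if_pos (by omega)]
      · rw [if_neg h2, if_neg (by omega)]

-- A's inner loop over all columns equals a single bounds-checked test of the diagonal column.
lemma inner_eq (row : List String) (element : String) (columns condition i x : Int) :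
    (PySem.List.pyRange 0 (columns + 1) 1).foldl (fun x j =>
      if i + j = condition then
        (if PySem.List.pyGetD row j "" = element then x + 1 else x)
      else x) x
      = (if (decide (0 ≤ condition - i) && decide (condition - i ≤ columns) &&
            (PySem.List.pyGetD row (condition - i) "" == element)) then x + 1 else x) := by
  have hbody : (fun (x j : Int) =>
      if i + j = condition then
        (if PySem.List.pyGetD row j "" = element then x + 1 else x)
      else x)
      = (fun (acc j : Int) => if j = condition - i then
          (fun (j : Int) (acc : Int) =>
            if PySem.List.pyGetD row j "" = element then acc + 1 else acc) j acc
        else acc) := by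
    funext acc j
    exact if_congr (by omega) rfl rfl
  rw [hbody, foldl_hit]
  by_cases hb : 0 ≤ condition - i ∧ condition - i ≤ columns
  · rw [if_pos (by omega)]
    by_cases he : PySem.List.pyGetD row (condition - i) "" = element
    · rw [if_pos he, if_pos (by simp [he]; omega)]
    · rw [if_neg he, if_neg (by simp [he])]
  · rw [if_neg (by omega), if_neg (by simp; intro h1 h2; omega)]

-- Counting with an accumulator fold equals countP.
lemma foldl_countP (p : Int → Bool) (l : List Int) (x : Int) :
    l.foldl (fun x i => if p i then x + 1 else x) x = x + (l.countP p : Nat) := by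
  induction l generalizing x with
  | nil => simp
  | cons a l ih =>
    simp only [List.foldl_cons, List.countP_cons, ih]
    by_cases h : p a
    · simp [h]; push_cast; ring
    · simp [h]

-- ===== VERDICT (by name: the statement is the Claim_ definition above) =====
theorem d2_spec : Claim_equal_d2 := by
  intro array element rows columns condition _ _
  unfold Spec_d2 d2 d2_alt
  have h1 : (fun (x i : Int) =>
      (PySem.List.pyRange 0 (columns + 1) 1).foldl (fun x j =>
        if i + j = condition then
          (if PySem.List.pyGetD (PySem.List.pyGetD array i []) j "" = element then x + 1 else x)
        else x) x)
      = (fun (x i : Int) =>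
        if (decide (0 ≤ condition - i) && decide (condition - i ≤ columns) &&
            (PySem.List.pyGetD (PySem.List.pyGetD array i []) (condition - i) "" == element))
        then x + 1 else x) := by
    funext x i
    exact inner_eq _ _ _ _ _ _
  rw [h1, foldl_countP]
  simp
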